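-- pv_equiv track=rewrite | github.com/harpoonlobotomy/harpoonlobotomy.github.io | Scripts/lsmg_parsing/nodesequence_tracer_mk2.py | build_grouped_candidates
-- ===== SOURCE A (Python) =====
-- from collections import defaultdict
--
-- def build_grouped_candidates(node_to_group, node_to_roles):
--     grouped_candidates = defaultdict(lambda: defaultdict(set))
--
--     for node_id, group_id in node_to_group.items():
--         roles = node_to_roles.get(node_id, set())
--         for role in roles:
--             grouped_candidates[group_id][role].add(node_id)
--
--     # Optional: convert sets to sorted lists for clean printing
--     for group_id, role_map in grouped_candidates.items():
--         for role, nodes in role_map.items():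
--             role_map[role] = sorted(nodes)
--
--     return dict(grouped_candidates)
-- ===== SOURCE B (Python) =====
-- def _insert_sorted(bucket, x):
--     # insert x into an already-sorted duplicate-free list, keeping it sorted and duplicate-free
--     for i, y in enumerate(bucket):
--         if x < y:
--             return bucket[:i] + [x] + bucket[i:]
--         if x == y:
--             return bucket
--     return bucket + [x]
--
--
-- def build_grouped_candidates(node_to_group, node_to_roles):
--     result = {}
--     for node_id, group_id in node_to_group.items():
--         for role in node_to_roles.get(node_id, ()):
--             inner = result.setdefault(group_id, {})
--             inner[role] = _insert_sorted(inner.get(role, []), node_id)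
--     return result
-- ===== Notes on version B (the rewrite author's own statement) =====
-- stated objective: alternative
-- what changed: B drops the defaultdict-of-sets and the final per-bucket sorting pass: it keeps each (group, role) bucket as a sorted duplicate-free list, inserting every node_id in order during the single pass over node_to_group.
import Mathlib
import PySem

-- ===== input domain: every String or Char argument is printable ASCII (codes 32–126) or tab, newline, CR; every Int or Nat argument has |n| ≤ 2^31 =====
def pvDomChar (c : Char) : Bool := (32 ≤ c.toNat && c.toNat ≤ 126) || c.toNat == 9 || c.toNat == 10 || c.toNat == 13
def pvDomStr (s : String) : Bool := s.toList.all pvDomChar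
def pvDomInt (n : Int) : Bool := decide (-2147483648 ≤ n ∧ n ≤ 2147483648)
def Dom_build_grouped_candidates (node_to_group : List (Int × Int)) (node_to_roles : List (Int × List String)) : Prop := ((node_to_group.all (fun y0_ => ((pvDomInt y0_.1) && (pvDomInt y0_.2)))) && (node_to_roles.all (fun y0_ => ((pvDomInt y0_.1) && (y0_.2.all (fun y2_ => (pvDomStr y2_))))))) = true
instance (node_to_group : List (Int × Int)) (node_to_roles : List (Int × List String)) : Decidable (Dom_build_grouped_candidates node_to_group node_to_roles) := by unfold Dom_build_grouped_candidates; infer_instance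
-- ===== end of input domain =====

-- B replaces A's defaultdict-of-sets plus final sorting pass by sorted duplicate-free list buckets
-- maintained by ordered insertion in the single pass; return value only (A mutates no argument).

-- ===== PORT A =====
def build_grouped_candidates (node_to_group : List (Int × Int)) (node_to_roles : List (Int × List String)) : List (Int × List (String × List Int)) :=
  -- grouped_candidates = defaultdict(lambda: defaultdict(set)); for node_id, group_id …: for role …: gc[group_id][role].add(node_id)
  let gc : PySem.Dict Int (PySem.Dict String (PySem.Set Int)) :=
    node_to_group.foldl (fun gc p =>
      ((PySem.Dict.mk node_to_roles).getD p.1 []).foldl (fun gc role =>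
        gc.modify p.2 PySem.Dict.empty (fun inner =>
          inner.modify role PySem.Set.empty (fun s => PySem.Set.add s p.1))) gc)
      PySem.Dict.empty
  -- for group_id, role_map …: for role, nodes …: role_map[role] = sorted(nodes); return dict(gc)
  gc.items.map (fun gr => (gr.1, gr.2.items.map (fun rn => (rn.1, PySem.List.sorted rn.2 (fun x => x) false))))

-- ===== PORT B =====
-- _insert_sorted(bucket, x): walk the sorted bucket, insert x before the first larger element, skip if present
def insortUnique (bucket : List Int) (x : Int) : List Int :=
  match bucket with
  | [] => bucket ++ [x]
  | y :: t => if x < y then x :: y :: t else if x = y then y :: t else y :: insortUnique t x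

def build_grouped_candidates_alt (node_to_group : List (Int × Int)) (node_to_roles : List (Int × List String)) : List (Int × List (String × List Int)) :=
  (node_to_group.foldl (fun res p =>
      ((PySem.Dict.mk node_to_roles).getD p.1 []).foldl (fun res role =>
        res.modify p.2 PySem.Dict.empty (fun inner =>
          inner.modify role [] (fun b => insortUnique b p.1))) res)
    (PySem.Dict.empty : PySem.Dict Int (PySem.Dict String (List Int)))).items.map
    (fun gr => (gr.1, gr.2.items))

-- ===== PRECONDITION & SPEC =====
def Spec_build_grouped_candidates (node_to_group : List (Int × Int)) (node_to_roles : List (Int × List String)) (out : List (Int × List (String × List Int))) : Prop := out = build_grouped_candidates_alt node_to_group node_to_roles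
instance (node_to_group : List (Int × Int)) (node_to_roles : List (Int × List String)) (out : List (Int × List (String × List Int))) : Decidable (Spec_build_grouped_candidates node_to_group node_to_roles out) := by unfold Spec_build_grouped_candidates; infer_instance

-- ===== CLAIM (what is proved, stated in full; the proofs are below) =====
def Claim_equal_build_grouped_candidates : Prop := ∀ (node_to_group : List (Int × Int)) (node_to_roles : List (Int × List String)), Dom_build_grouped_candidates node_to_group node_to_roles → Spec_build_grouped_candidates node_to_group node_to_roles (build_grouped_candidates node_to_group node_to_roles)

-- ===== LEMMAS AND PROOFS =====

-- map a function over the values of a dict, keys and order unchanged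
def mapVals {κ ν ν' : Type} (h : ν → ν') (d : PySem.Dict κ ν) : PySem.Dict κ ν' :=
  PySem.Dict.mk (d.items.map (fun p => (p.1, h p.2)))

theorem contains_mapVals {κ ν ν' : Type} [BEq κ] (h : ν → ν') (d : PySem.Dict κ ν) (k : κ) :
    (mapVals h d).contains k = d.contains k := by
  simp only [mapVals, PySem.Dict.contains, List.any_map]
  rfl

theorem getD_mapVals {κ ν ν' : Type} [BEq κ] (h : ν → ν') (d : PySem.Dict κ ν) (k : κ) (d0 : ν) :
    (mapVals h d).getD k (h d0) = h (d.getD k d0) := by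
  simp only [mapVals, PySem.Dict.getD, PySem.Dict.get?, List.find?_map]
  have he : ((fun p => p.1 == k) ∘ fun (p : κ × ν) => (p.1, h p.2)) = fun p => p.1 == k := rfl
  rw [he]
  rcases hf : List.find? (fun p => p.1 == k) d.items with _ | p <;> rw [hf] <;> simp

theorem mapVals_insert {κ ν ν' : Type} [BEq κ] (h : ν → ν') (d : PySem.Dict κ ν) (k : κ) (v : ν) :
    mapVals h (d.insert k v) = (mapVals h d).insert k (h v) := by
  have hc' : (mapVals h d).contains k = d.contains k := contains_mapVals h d k
  by_cases hc : d.contains k = true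
  · simp only [PySem.Dict.insert, hc, hc', if_pos]
    simp only [mapVals, List.map_map]
    congr 1
    apply List.map_congr_left
    intro p _
    by_cases hpk : (p.1 == k) = true <;> simp [Function.comp, hpk]
  · simp only [PySem.Dict.insert, hc, hc', Bool.false_eq_true]
    simp [mapVals]

theorem getD_mem_values {κ ν : Type} [BEq κ] (d : PySem.Dict κ ν) (k : κ) (d0 : ν) :
    d.getD k d0 = d0 ∨ d.getD k d0 ∈ d.values := by
  simp only [PySem.Dict.getD, PySem.Dict.get?]
  rcases hf : List.find? (fun p => p.1 == k) d.items with _ | p <;> rw [hf]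
  · left; rfl
  · right
    simp only [Option.map_some, Option.getD_some, PySem.Dict.values]
    exact List.mem_map.mpr ⟨p, List.mem_of_find?_eq_some hf, rfl⟩

-- inserting an element that is already there changes nothing
theorem insortUnique_of_mem (l : List Int) (x : Int) (hp : l.Pairwise (· ≤ ·)) (hx : x ∈ l) :
    insortUnique l x = l := by
  induction l with
  | nil => cases hx
  | cons y t ih =>
    rcases List.mem_cons.mp hx with rfl | hxt
    · simp [insortUnique]
    · have hyx : y ≤ x := (List.pairwise_cons.mp hp).1 x hxt
      have hnlt : ¬ x < y := not_lt.mpr hyx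
      by_cases hxy : x = y
      · simp [insortUnique, hxy]
      · simp only [insortUnique, if_neg hnlt, if_neg hxy]
        rw [ih (List.pairwise_cons.mp hp).2 hxt]

theorem mem_insortUnique (l : List Int) (x b : Int) (hb : b ∈ insortUnique l x) :
    b = x ∨ b ∈ l := by
  induction l with
  | nil => simp [insortUnique] at hb; simp [hb]
  | cons y t ih =>
    by_cases hlt : x < y
    · simp only [insortUnique, if_pos hlt] at hb
      rcases List.mem_cons.mp hb with rfl | hb
      · exact Or.inl rfl
      · exact Or.inr hb
    · by_cases hxy : x = y
      · simp only [insortUnique, if_neg hlt, if_pos hxy] at hb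
        exact Or.inr hb
      · simp only [insortUnique, if_neg hlt, if_neg hxy] at hb
        rcases List.mem_cons.mp hb with rfl | hb
        · exact Or.inr List.mem_cons_self
        · rcases ih hb with h | h
          · exact Or.inl h
          · exact Or.inr (List.mem_cons_of_mem _ h)

-- inserting a fresh element permutes x :: l
theorem insortUnique_perm_of_not_mem (l : List Int) (x : Int) (hx : x ∉ l) :
    (insortUnique l x).Perm (x :: l) := by
  induction l with
  | nil => simp [insortUnique]
  | cons y t ih =>
    have hxy : x ≠ y := fun h => hx (h ▸ List.mem_cons_self)
    by_cases hlt : x < y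
    · simp only [insortUnique, if_pos hlt]
      exact List.Perm.refl _
    · simp only [insortUnique, if_neg hlt, if_neg hxy]
      have h1 := ih (fun h => hx (List.mem_cons_of_mem _ h))
      exact (List.Perm.cons y h1).trans (List.Perm.swap x y t)

theorem insortUnique_pairwise (l : List Int) (x : Int) (hp : l.Pairwise (· < ·)) :
    (insortUnique l x).Pairwise (· < ·) := by
  induction l with
  | nil => simp [insortUnique]
  | cons y t ih =>
    obtain ⟨hy, ht⟩ := List.pairwise_cons.mp hp
    by_cases hlt : x < y
    · simp only [insortUnique, if_pos hlt]
      exact List.pairwise_cons.mpr ⟨by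
        intro b hb
        rcases List.mem_cons.mp hb with rfl | hb
        · exact hlt
        · exact lt_trans hlt (hy b hb), hp⟩
    · by_cases hxy : x = y
      · simp only [insortUnique, if_neg hlt, if_pos hxy]; exact hp
      · simp only [insortUnique, if_neg hlt, if_neg hxy]
        refine List.pairwise_cons.mpr ⟨?_, ih ht⟩
        intro b hb
        rcases mem_insortUnique t x b hb with rfl | hb
        · omega
        · exact hy b hb

-- the key bucket lemma: B's ordered insert tracks A's set-add-then-sort
theorem sorted_add (s : PySem.Set Int) (n : Int) (hs : s.Nodup) :
    PySem.List.sorted (PySem.Set.add s n) (fun x => x) false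
      = insortUnique (PySem.List.sorted s (fun x => x) false) n := by
  have hperm : (PySem.List.sorted s (fun x => x) false).Perm s := PySem.List.sorted_perm s _ false
  have hpl : (PySem.List.sorted s (fun x => x) false).Pairwise (· ≤ ·) :=
    PySem.List.sorted_pairwise s (fun x => x)
  by_cases hn : n ∈ s
  · have : PySem.Set.add s n = s := by
      simp [PySem.Set.add, hn]
    rw [this, insortUnique_of_mem _ _ hpl (hperm.mem_iff.mpr hn)]
  · have hadd : PySem.Set.add s n = s ++ [n] := by
      simp [PySem.Set.add, hn]
    rw [hadd]
    have hnd : (PySem.List.sorted s (fun x => x) false).Nodup := hperm.nodup_iff.mpr hs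
    have hplt : (PySem.List.sorted s (fun x => x) false).Pairwise (· < ·) := by
      have := List.Pairwise.and hpl (List.Pairwise.imp (fun h => h) hnd)
      exact this.imp (fun ⟨hle, hne⟩ => lt_of_le_of_ne hle hne)
    have hnm : n ∉ PySem.List.sorted s (fun x => x) false := fun h => hn (hperm.mem_iff.mp h)
    apply PySem.List.sorted_eq_of_perm_of_pairwise_lt
    · exact (insortUnique_perm_of_not_mem _ n hnm).trans
        (by
          have h1 : (n :: PySem.List.sorted s (fun x => x) false).Perm (n :: s) := List.Perm.cons n hperm
          exact h1.trans (by simpa using (List.perm_append_comm (l₁ := [n]) (l₂ := s))))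
    · exact insortUnique_pairwise _ n hplt

-- invariant of A's accumulator: every bucket set is duplicate-free
def InvA (a : PySem.Dict Int (PySem.Dict String (PySem.Set Int))) : Prop :=
  ∀ inner ∈ a.values, ∀ s ∈ inner.values, List.Nodup s

def T2 (inner : PySem.Dict String (PySem.Set Int)) : PySem.Dict String (List Int) :=
  mapVals (fun s => PySem.List.sorted s (fun x => x) false) inner

def TOut (a : PySem.Dict Int (PySem.Dict String (PySem.Set Int))) : PySem.Dict Int (PySem.Dict String (List Int)) :=
  mapVals T2 a

theorem bucket_nodup (a : PySem.Dict Int (PySem.Dict String (PySem.Set Int))) (g : Int) (r : String)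
    (ha : InvA a) : ((a.getD g PySem.Dict.empty).getD r PySem.Set.empty).Nodup := by
  rcases getD_mem_values (a.getD g PySem.Dict.empty) r PySem.Set.empty with h2 | h2
  · rw [h2]; exact List.nodup_nil
  · rcases getD_mem_values a g PySem.Dict.empty with h | h
    · rw [h] at h2
      simp [PySem.Dict.empty, PySem.Dict.values] at h2
    · exact ha _ h _ h2

-- one (node, group, role) step commutes with the transport
theorem step_comm (a : PySem.Dict Int (PySem.Dict String (PySem.Set Int))) (n g : Int) (r : String)
    (ha : InvA a) :
    TOut (a.modify g PySem.Dict.empty (fun inner => inner.modify r PySem.Set.empty (fun s => PySem.Set.add s n)))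
      = (TOut a).modify g PySem.Dict.empty (fun inner => inner.modify r [] (fun b => insortUnique b n)) := by
  have hT2e : T2 PySem.Dict.empty = PySem.Dict.empty := rfl
  have hJ : (TOut a).getD g PySem.Dict.empty = T2 (a.getD g PySem.Dict.empty) := by
    rw [← hT2e, TOut]
    exact getD_mapVals T2 a g PySem.Dict.empty
  have hse : PySem.List.sorted (PySem.Set.empty : PySem.Set Int) (fun x => x) false = [] := rfl
  have hK : (T2 (a.getD g PySem.Dict.empty)).getD r []
      = PySem.List.sorted ((a.getD g PySem.Dict.empty).getD r PySem.Set.empty) (fun x => x) false := by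
    rw [← hse, T2]
    exact getD_mapVals _ (a.getD g PySem.Dict.empty) r PySem.Set.empty
  simp only [PySem.Dict.modify, TOut]
  rw [mapVals_insert]
  congr 1
  simp only [T2]
  rw [mapVals_insert]
  have hJ' : (mapVals T2 a).getD g PySem.Dict.empty
      = mapVals (fun s => PySem.List.sorted s (fun x => x) false) (a.getD g PySem.Dict.empty) := hJ
  rw [hJ']
  congr 1
  have hK' : (mapVals (fun s => PySem.List.sorted s (fun x => x) false) (a.getD g PySem.Dict.empty)).getD r []
      = PySem.List.sorted ((a.getD g PySem.Dict.empty).getD r PySem.Set.empty) (fun x => x) false := hK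
  rw [hK']
  exact sorted_add _ n (bucket_nodup a g r ha)

theorem step_inv (a : PySem.Dict Int (PySem.Dict String (PySem.Set Int))) (n g : Int) (r : String)
    (ha : InvA a) :
    InvA (a.modify g PySem.Dict.empty (fun inner => inner.modify r PySem.Set.empty (fun s => PySem.Set.add s n))) := by
  intro inner hinner s hs
  simp only [PySem.Dict.modify] at hinner
  rcases PySem.Dict.mem_values_insert _ _ _ _ hinner with rfl | hmem
  · rcases PySem.Dict.mem_values_insert _ _ _ _ hs with rfl | hsmem
    · exact PySem.Set.nodup_add _ n (bucket_nodup a g r ha)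
    · rcases getD_mem_values a g PySem.Dict.empty with h | h
      · rw [h] at hsmem
        simp [PySem.Dict.empty, PySem.Dict.values] at hsmem
      · exact ha _ h _ hsmem
  · exact ha _ hmem _ hs

theorem inner_fold (roles : List String) (n g : Int)
    (a : PySem.Dict Int (PySem.Dict String (PySem.Set Int))) (ha : InvA a) :
    TOut (roles.foldl (fun a role => a.modify g PySem.Dict.empty (fun inner => inner.modify role PySem.Set.empty (fun s => PySem.Set.add s n))) a)
      = roles.foldl (fun b role => b.modify g PySem.Dict.empty (fun inner => inner.modify role [] (fun bk => insortUnique bk n))) (TOut a)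
    ∧ InvA (roles.foldl (fun a role => a.modify g PySem.Dict.empty (fun inner => inner.modify role PySem.Set.empty (fun s => PySem.Set.add s n))) a) := by
  induction roles generalizing a with
  | nil => exact ⟨rfl, ha⟩
  | cons r rs ih =>
    simp only [List.foldl_cons]
    have h1 := step_comm a n g r ha
    have h2 := step_inv a n g r ha
    obtain ⟨ha', hb'⟩ := ih _ h2
    exact ⟨by rw [ha', h1], hb'⟩

theorem outer_fold (ntg : List (Int × Int)) (ntr : List (Int × List String))
    (a : PySem.Dict Int (PySem.Dict String (PySem.Set Int))) (ha : InvA a) :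
    TOut (ntg.foldl (fun a p => ((PySem.Dict.mk ntr).getD p.1 []).foldl (fun a role => a.modify p.2 PySem.Dict.empty (fun inner => inner.modify role PySem.Set.empty (fun s => PySem.Set.add s p.1))) a) a)
      = ntg.foldl (fun b p => ((PySem.Dict.mk ntr).getD p.1 []).foldl (fun b role => b.modify p.2 PySem.Dict.empty (fun inner => inner.modify role [] (fun bk => insortUnique bk p.1))) b) (TOut a) := by
  induction ntg generalizing a with
  | nil => rfl
  | cons p ps ih =>
    simp only [List.foldl_cons]
    obtain ⟨h1, h2⟩ := inner_fold ((PySem.Dict.mk ntr).getD p.1 []) p.1 p.2 a ha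
    rw [← h1]
    exact ih _ h2

-- ===== VERDICT (by name: the statement is the Claim_ definition above) =====
theorem build_grouped_candidates_spec : Claim_equal_build_grouped_candidates := by
  intro ntg ntr _
  show build_grouped_candidates ntg ntr = build_grouped_candidates_alt ntg ntr
  unfold build_grouped_candidates build_grouped_candidates_alt
  have ha0 : InvA PySem.Dict.empty := by
    intro inner h
    simp [PySem.Dict.empty, PySem.Dict.values] at h
  have h := outer_fold ntg ntr PySem.Dict.empty ha0
  have hTe : TOut PySem.Dict.empty = PySem.Dict.empty := rfl
  rw [hTe] at h
  rw [← h]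
  simp only [TOut, T2, mapVals, List.map_map]
  rfl
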